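-- pv_equiv track=rewrite | github.com/evdcush/game_theory | game_theory/deal_no_deal.py | gen_choices
-- ===== SOURCE A (Python) =====
-- def gen_choices(cnts, idx=0, choice=[]):
--     """Generate all the valid choices.
--     It generates both yours and your opponent choices.
--     """
--     if idx >= len(cnts):
--         return [(choice[:], [n - c for n, c in zip(cnts, choice)]),]
--     choices = []
--     for c in range(cnts[idx] + 1):
--         choice.append(c)
--         choices += gen_choices(cnts, idx + 1, choice)
--         choice.pop()
--     return choices
-- ===== SOURCE B (Python) =====
-- def gen_choices(cnts, idx=0, choice=[]):
--     """Generate all the valid choices.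
--     It generates both yours and your opponent choices.
--     """
--     combos = [[]]
--     for i in range(idx, len(cnts)):
--         top = cnts[i] + 1
--         combos = [acc + [c] for acc in combos for c in range(top)]
--     return [(choice + combo, [n - c for n, c in zip(cnts, choice + combo)])
--             for combo in combos]
-- ===== Notes on version B (the rewrite author's own statement) =====
-- stated objective: alternative
-- what changed: Replaces A's depth-first recursive backtracking on a shared mutable choice list with an iterative breadth-first build: one loop over the indices grows a table of all partial combos, then a single comprehension attaches the prefix and the complements.
-- outside the precondition, e.g. on gen_choices([1, 2], -5, []): A raises IndexError, B raises IndexError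
import Mathlib
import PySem

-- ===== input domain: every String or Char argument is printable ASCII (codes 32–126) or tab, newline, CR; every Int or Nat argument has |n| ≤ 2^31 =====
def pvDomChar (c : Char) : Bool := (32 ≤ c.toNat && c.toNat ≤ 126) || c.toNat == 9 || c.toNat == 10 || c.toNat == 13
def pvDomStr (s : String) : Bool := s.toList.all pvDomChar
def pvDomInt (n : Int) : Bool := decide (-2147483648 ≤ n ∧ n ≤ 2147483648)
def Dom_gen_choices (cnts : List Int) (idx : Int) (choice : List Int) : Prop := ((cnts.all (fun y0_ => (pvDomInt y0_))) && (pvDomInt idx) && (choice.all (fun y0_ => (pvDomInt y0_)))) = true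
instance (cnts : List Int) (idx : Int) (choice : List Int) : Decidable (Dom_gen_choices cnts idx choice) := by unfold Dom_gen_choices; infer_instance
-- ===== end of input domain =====

-- B replaces A's depth-first recursive backtracking with an iterative breadth-first product-table
-- build (objective: alternative decomposition, same cost). A mutates `choice` only transiently
-- (append then pop), so the net effect on the caller's list is unchanged; equivalence is about
-- the return value.

-- ===== PORT A =====
-- Literal port of A's recursion; the `none` branch is Python's IndexError (excluded by Pre_).
def gen_choices (cnts : List Int) (idx : Int) (choice : List Int) : List (List Int × List Int) :=
  if idx ≥ (cnts.length : Int) then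
    [(choice, List.zipWith (fun n c => n - c) cnts choice)]
  else
    match PySem.List.pyGet? cnts idx with
    | none => []
    | some v =>
      (PySem.List.pyRange 0 (v + 1) 1).foldl
        (fun choices c => choices ++ gen_choices cnts (idx + 1) (choice ++ [c])) []
termination_by ((cnts.length : Int) - idx).toNat
decreasing_by
  simp only [not_le] at *
  omega

-- ===== PORT B =====
-- Literal port of Source B: build the table `combos` by one pass over the indices, then finalize.
-- pyGetD is Source B's cnts[i]; under Pre_ every i in range(idx, len) is in range.
def gen_choices_alt (cnts : List Int) (idx : Int) (choice : List Int) : List (List Int × List Int) :=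
  let combos := (PySem.List.pyRange idx (cnts.length : Int) 1).foldl
    (fun combos i =>
      combos.flatMap (fun acc =>
        (PySem.List.pyRange 0 (PySem.List.pyGetD cnts i 0 + 1) 1).map (fun c => acc ++ [c])))
    [[]]
  combos.map (fun combo =>
    (choice ++ combo, List.zipWith (fun n c => n - c) cnts (choice ++ combo)))

-- ===== PRECONDITION & SPEC =====
-- Pre_ excludes exactly the inputs where Python A raises IndexError: idx below -len(cnts)
-- while still below len(cnts) (cnts[idx] out of range). B raises there too.
def Pre_gen_choices (cnts : List Int) (idx : Int) (choice : List Int) : Prop :=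
  (cnts.length : Int) ≤ idx ∨ -(cnts.length : Int) ≤ idx

instance (cnts : List Int) (idx : Int) (choice : List Int) : Decidable (Pre_gen_choices cnts idx choice) := by unfold Pre_gen_choices; infer_instance

def pvWitness_gen_choices : List Int × Int × List Int := ([1, 2], 0, [])

def Spec_gen_choices (cnts : List Int) (idx : Int) (choice : List Int) (out : List (List Int × List Int)) : Prop := out = gen_choices_alt cnts idx choice
instance (cnts : List Int) (idx : Int) (choice : List Int) (out : List (List Int × List Int)) : Decidable (Spec_gen_choices cnts idx choice out) := by unfold Spec_gen_choices; infer_instance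

-- ===== CLAIM (what is proved, stated in full; the proofs are below) =====
def Claim_equal_gen_choices : Prop := ∀ (cnts : List Int) (idx : Int) (choice : List Int), Dom_gen_choices cnts idx choice → Pre_gen_choices cnts idx choice → Spec_gen_choices cnts idx choice (gen_choices cnts idx choice)

-- ===== LEMMAS AND PROOFS =====

-- The product-table step distributes over the accumulator: starting the fold from L is the
-- same as starting from [[]] and prefixing each element of L.
theorem pv_fold_distrib (h : Int → List Int) (rest : List Int) (L : List (List Int)) :
    rest.foldl (fun cs i => cs.flatMap (fun acc => (h i).map (fun c => acc ++ [c]))) L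
      = L.flatMap (fun a =>
          (rest.foldl (fun cs i => cs.flatMap (fun acc => (h i).map (fun c => acc ++ [c]))) [[]]).map
            (fun t => a ++ t)) := by
  induction rest generalizing L with
  | nil => simp
  | cons i rest ih =>
    simp only [List.foldl_cons]
    rw [ih, ih ([[]].flatMap _)]
    simp [List.flatMap_assoc, List.flatMap_map, List.map_flatMap, List.map_map,
      Function.comp_def, List.append_assoc]

theorem pv_main (k : ℕ) (cnts : List Int) (idx : Int) (choice : List Int)
    (hk : ((cnts.length : Int) - idx).toNat = k)
    (hpre : Pre_gen_choices cnts idx choice) :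
    gen_choices cnts idx choice = gen_choices_alt cnts idx choice := by
  induction k generalizing idx choice with
  | zero =>
    have hge : (cnts.length : Int) ≤ idx := by omega
    rw [gen_choices]
    simp only [ge_iff_le, hge, if_true]
    unfold gen_choices_alt
    rw [PySem.List.pyRange_one_eq_nil hge]
    simp
  | succ k ih =>
    by_cases hge : (cnts.length : Int) ≤ idx
    · rw [gen_choices]
      simp only [ge_iff_le, hge, if_true]
      unfold gen_choices_alt
      rw [PySem.List.pyRange_one_eq_nil hge]
      simp
    · have hlt : idx < (cnts.length : Int) := by omega
      have hlo : -(cnts.length : Int) ≤ idx := by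
        rcases hpre with h | h
        · omega
        · exact h
      -- A's cnts[idx] succeeds
      have hin : PySem.Raise.InRange cnts.length idx := ⟨hlo, hlt⟩
      obtain ⟨v, hv⟩ : ∃ v, PySem.List.pyGet? cnts idx = some v := by
        rcases hx : PySem.List.pyGet? cnts idx with _ | v
        · exact absurd ((PySem.List.pyGet?_eq_none_iff _ _).mp hx) (not_not.mpr hin)
        · exact ⟨v, rfl⟩
      have hvd : PySem.List.pyGetD cnts idx 0 = v := by
        have : PySem.List.pyGetD cnts idx 0 = (PySem.List.pyGet? cnts idx).getD 0 := rfl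
        rw [this, hv]; rfl
      -- A side: recurrence as flatMap
      rw [gen_choices]
      simp only [ge_iff_le, hge, if_false, hv]
      rw [PySem.List.foldl_append_eq_flatMap]
      simp only [List.nil_append]
      have hrec : ∀ c ∈ PySem.List.pyRange 0 (v + 1) 1,
          gen_choices cnts (idx + 1) (choice ++ [c])
            = gen_choices_alt cnts (idx + 1) (choice ++ [c]) :=
        fun c _ => ih (idx + 1) (choice ++ [c]) (by omega) (Or.inr (by omega))
      rw [List.flatMap_congr hrec]
      -- B side: peel off index idx and distribute
      unfold gen_choices_alt
      rw [PySem.List.pyRange_one_cons hlt]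
      simp only [List.foldl_cons]
      rw [pv_fold_distrib (fun i => PySem.List.pyRange 0 (PySem.List.pyGetD cnts i 0 + 1) 1)
        (PySem.List.pyRange (idx + 1) (cnts.length : Int) 1)
        ([[]].flatMap (fun acc =>
          (PySem.List.pyRange 0 (PySem.List.pyGetD cnts idx 0 + 1) 1).map (fun c => acc ++ [c])))]
      simp [hvd, List.map_flatMap, List.flatMap_map, List.map_map,
        Function.comp_def, List.append_assoc]

-- ===== VERDICT (by name: the statement is the Claim_ definition above) =====
theorem gen_choices_spec : Claim_equal_gen_choices := by
  intro cnts idx choice _ hpre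
  exact pv_main ((cnts.length : Int) - idx).toNat cnts idx choice rfl hpre
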